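-- pv_equiv track=rewrite | github.com/fabioscialanga/cag | src/cag/agents/retrieval_agent.py | _cluster_chunks
-- ===== SOURCE A (Python) =====
-- STOPWORDS = {
--     "a", "about", "an", "and", "are", "as", "at", "be", "by", "do", "for", "from",
--     "how", "if", "in", "is", "it", "of", "on", "or", "that", "the", "this", "to",
--     "what", "when", "which", "with",
-- }
--
-- def _normalize_text(text: str) -> str:
--     return "".join(character.lower() if character.isalnum() or character.isspace() else " " for character in text)
--
-- def _extract_keywords(text: str, limit: int = 10) -> list[str]:
--     keywords: list[str] = []
--     for token in _normalize_text(text).split():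
--         if len(token) <= 2 or token in STOPWORDS or token in keywords:
--             continue
--         keywords.append(token)
--         if len(keywords) >= limit:
--             break
--     return keywords
--
-- def _cluster_chunks(chunks: list[dict]) -> dict[int, str]:
--     cluster_keyword_sets: list[set[str]] = []
--     cluster_sources: list[set[str]] = []
--     assignments: dict[int, str] = {}
--
--     for index, chunk in enumerate(chunks):
--         keywords = set(
--             _extract_keywords(
--                 f"{chunk.get('source', '')} {chunk.get('domain_module', '')} {chunk.get('content', '')}",
--                 limit=12,
--             )
--         )
--         source = str(chunk.get("source", "N/A"))
--         assigned_cluster: int | None = None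
--
--         for cluster_index, cluster_keywords in enumerate(cluster_keyword_sets):
--             keyword_overlap = len(keywords & cluster_keywords)
--             same_source = source in cluster_sources[cluster_index]
--             if keyword_overlap >= 2 or (same_source and keyword_overlap >= 1):
--                 assigned_cluster = cluster_index
--                 cluster_keyword_sets[cluster_index].update(keywords)
--                 cluster_sources[cluster_index].add(source)
--                 break
--
--         if assigned_cluster is None:
--             cluster_keyword_sets.append(set(keywords))
--             cluster_sources.append({source})
--             assigned_cluster = len(cluster_keyword_sets) - 1
--
--         assignments[index] = f"cluster_{assigned_cluster + 1}"
--
--     return assignments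
-- ===== SOURCE B (Python) =====
-- STOPWORDS = {
--     "a", "about", "an", "and", "are", "as", "at", "be", "by", "do", "for", "from",
--     "how", "if", "in", "is", "it", "of", "on", "or", "that", "the", "this", "to",
--     "what", "when", "which", "with",
-- }
--
-- def _normalize_text(text: str) -> str:
--     return "".join(character.lower() if character.isalnum() or character.isspace() else " " for character in text)
--
-- def _extract_keywords(text: str, limit: int = 10) -> list[str]:
--     keywords: list[str] = []
--     for token in _normalize_text(text).split():
--         if len(token) <= 2 or token in STOPWORDS or token in keywords:
--             continue
--         keywords.append(token)
--         if len(keywords) >= limit: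
--             break
--     return keywords
--
-- def _cluster_chunks(chunks: list[dict]) -> dict[int, str]:
--     # Inverted indexes instead of a linear scan over all existing clusters:
--     kw_index: dict[str, set[int]] = {}   # keyword -> clusters containing it
--     src_index: dict[str, set[int]] = {}  # source  -> clusters containing it
--     n_clusters = 0
--     assignments: dict[int, str] = {}
--
--     for index, chunk in enumerate(chunks):
--         keywords = set(
--             _extract_keywords(
--                 f"{chunk.get('source', '')} {chunk.get('domain_module', '')} {chunk.get('content', '')}",
--                 limit=12,
--             )
--         )
--         source = str(chunk.get("source", "N/A"))
--
--         # Tally keyword overlap per candidate cluster via the inverted index.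
--         counts: dict[int, int] = {}
--         for kw in keywords:
--             for c in kw_index.get(kw, ()):
--                 counts[c] = counts.get(c, 0) + 1
--
--         src_clusters = src_index.get(source, set())
--         # Every candidate already has overlap >= 1, so the original rule
--         # "overlap >= 2 or (same source and overlap >= 1)" reduces to:
--         candidates = [c for c, v in counts.items() if v >= 2 or c in src_clusters]
--
--         if candidates:
--             assigned = min(candidates)
--         else:
--             assigned = n_clusters
--             n_clusters += 1
--
--         for kw in keywords:
--             kw_index.setdefault(kw, set()).add(assigned)
--         src_index.setdefault(source, set()).add(assigned)
--
--         assignments[index] = f"cluster_{assigned + 1}"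
--
--     return assignments
-- ===== Notes on version B (the rewrite author's own statement) =====
-- stated objective: alternative
-- what changed: A scans every existing cluster per chunk and intersects keyword sets; B maintains inverted indexes (keyword -> clusters, source -> clusters), tallies overlap counts only for clusters sharing a keyword with the chunk, and assigns the minimal candidate index (equal to A's first match, since A scans cluster indexes in increasing order).
import Mathlib
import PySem

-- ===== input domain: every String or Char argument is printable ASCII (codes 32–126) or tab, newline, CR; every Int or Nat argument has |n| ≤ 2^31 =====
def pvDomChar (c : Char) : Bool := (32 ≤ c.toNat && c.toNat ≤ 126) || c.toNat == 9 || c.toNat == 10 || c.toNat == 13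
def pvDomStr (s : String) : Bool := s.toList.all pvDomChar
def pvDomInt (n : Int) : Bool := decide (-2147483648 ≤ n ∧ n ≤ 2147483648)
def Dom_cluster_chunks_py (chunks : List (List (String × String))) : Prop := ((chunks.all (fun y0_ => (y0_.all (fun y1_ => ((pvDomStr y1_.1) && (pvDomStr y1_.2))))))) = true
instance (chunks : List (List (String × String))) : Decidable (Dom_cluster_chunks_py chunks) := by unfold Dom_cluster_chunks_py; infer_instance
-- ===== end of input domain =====

-- B replaces A's per-chunk linear scan over all existing clusters (set intersection with each)
-- by two inverted indexes (keyword -> clusters, source -> clusters): overlaps are tallied only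
-- for clusters sharing a keyword, and the assigned cluster is the minimal candidate index
-- (an alternative algorithm; return-value equivalence is proved for all inputs, both are total).

-- ===== PORT A =====
-- shared text helpers: _normalize_text / _extract_keywords / STOPWORDS and the per-chunk
-- keyword/source extraction are textually identical in Source A and Source B, so they are defined once here
def pvStopwords : List String :=
  ["a", "about", "an", "and", "are", "as", "at", "be", "by", "do", "for", "from",
   "how", "if", "in", "is", "it", "of", "on", "or", "that", "the", "this", "to",
   "what", "when", "which", "with"]

-- character.lower() on the ASCII domain is the single char lowerChar c
def pvNormalizeText (s : String) : String :=
  String.ofList (s.toList.map (fun c =>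
    if PySem.Chars.isalnum c || PySem.Chars.isspace c then PySem.Chars.lowerChar c else ' '))

def pvExtractGo (limit : Int) : List String → List String → List String
  | [], kws => kws
  | t :: rest, kws =>
    if PySem.Str.len t ≤ 2 ∨ t ∈ pvStopwords ∨ t ∈ kws then pvExtractGo limit rest kws
    else
      let kws' := kws ++ [t]
      if limit ≤ PySem.List.len kws' then kws' else pvExtractGo limit rest kws'

def pvExtractKeywords (text : String) (limit : Int) : List String :=
  pvExtractGo limit (PySem.Str.split₀ (pvNormalizeText text)) []

-- chunk.get(k, dflt): first match in the association list (Python dict lookup)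
def pvGet (chunk : List (String × String)) (k dflt : String) : String :=
  (PySem.Dict.mk chunk).getD k dflt

def pvChunkKeywords (chunk : List (String × String)) : PySem.Set String :=
  PySem.Set.ofList (pvExtractKeywords
    (pvGet chunk "source" "" ++ " " ++ pvGet chunk "domain_module" "" ++ " " ++ pvGet chunk "content" "") 12)

-- str() of a value that is already a str is the identity
def pvChunkSource (chunk : List (String × String)) : String := pvGet chunk "source" "N/A"

def pvLabel (c : Nat) : String := "cluster_" ++ PySem.Int.toStr ((c : Int) + 1)

-- A's inner loop: scan the clusters in order, return the first index whose condition fires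
def pvAFind (K : PySem.Set String) (src : String) :
    List (PySem.Set String) → List (PySem.Set String) → Nat → Option Nat
  | [], _, _ => none
  | _ :: _, [], _ => none  -- unreachable: both cluster lists always have the same length
  | ks :: krest, ss :: srest, i =>
    let ov := PySem.Set.len (PySem.Set.inter K ks)
    let same_source := PySem.Set.contains ss src
    if 2 ≤ ov ∨ (same_source = true ∧ 1 ≤ ov) then some i
    else pvAFind K src krest srest (i + 1)

-- assignments[index] = label: keys 0,1,2,… are fresh, so the dict is the appended list
def pvALoop : List (List (String × String)) → List (PySem.Set String) → List (PySem.Set String) →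
    Int → List (Int × String) → List (Int × String)
  | [], _, _, _, acc => acc
  | ch :: rest, ksets, srcs, idx, acc =>
    let K := pvChunkKeywords ch
    let src := pvChunkSource ch
    match pvAFind K src ksets srcs 0 with
    | some c =>
        pvALoop rest (ksets.modify c (fun s => PySem.Set.update s K))
                      (srcs.modify c (fun s => PySem.Set.add s src))
                      (idx + 1) (acc ++ [(idx, pvLabel c)])
    | none =>
        -- set(keywords) is a copy of the set K; {source} = Set.ofList [src]
        pvALoop rest (ksets ++ [K]) (srcs ++ [PySem.Set.ofList [src]])
                (idx + 1) (acc ++ [(idx, pvLabel ksets.length)])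

def cluster_chunks_py (chunks : List (List (String × String))) : List (Int × String) :=
  pvALoop chunks [] [] 0 []

-- ===== PORT B =====
-- counts[c] = counts.get(c, 0) + 1 tallied over the postings of each keyword
def pvBCounts (K : PySem.Set String) (kwidx : PySem.Dict String (PySem.Set Nat)) : PySem.Dict Nat Int :=
  K.foldl (fun cnt kw =>
      (kwidx.getD kw PySem.Set.empty).foldl (fun cnt c => cnt.modify c 0 (· + 1)) cnt)
    PySem.Dict.empty

-- kw_index.setdefault(kw, set()).add(assigned) for each keyword
def pvBIndexAdd (K : PySem.Set String) (kwidx : PySem.Dict String (PySem.Set Nat)) (a : Nat) :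
    PySem.Dict String (PySem.Set Nat) :=
  K.foldl (fun d kw => d.modify kw PySem.Set.empty (fun s => PySem.Set.add s a)) kwidx

def pvBLoop : List (List (String × String)) → PySem.Dict String (PySem.Set Nat) →
    PySem.Dict String (PySem.Set Nat) → Nat → Int → List (Int × String) → List (Int × String)
  | [], _, _, _, _, acc => acc
  | ch :: rest, kwidx, srcidx, n, idx, acc =>
    let K := pvChunkKeywords ch
    let src := pvChunkSource ch
    let counts := pvBCounts K kwidx
    let srcClusters := srcidx.getD src PySem.Set.empty
    let cands := (counts.items.filter
        (fun p => decide (2 ≤ p.2) || PySem.Set.contains srcClusters p.1)).map (·.1)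
    match PySem.List.min? cands (fun c => c) with
    | some c =>
        pvBLoop rest (pvBIndexAdd K kwidx c)
                      (srcidx.modify src PySem.Set.empty (fun s => PySem.Set.add s c))
                      n (idx + 1) (acc ++ [(idx, pvLabel c)])
    | none =>
        pvBLoop rest (pvBIndexAdd K kwidx n)
                      (srcidx.modify src PySem.Set.empty (fun s => PySem.Set.add s n))
                      (n + 1) (idx + 1) (acc ++ [(idx, pvLabel n)])

def cluster_chunks_py_alt (chunks : List (List (String × String))) : List (Int × String) :=
  pvBLoop chunks PySem.Dict.empty PySem.Dict.empty 0 0 []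

-- ===== PRECONDITION & SPEC =====
def Spec_cluster_chunks_py (chunks : List (List (String × String))) (out : List (Int × String)) : Prop := out = cluster_chunks_py_alt chunks
instance (chunks : List (List (String × String))) (out : List (Int × String)) : Decidable (Spec_cluster_chunks_py chunks out) := by unfold Spec_cluster_chunks_py; infer_instance

-- ===== CLAIM (what is proved, stated in full; the proofs are below) =====
def Claim_equal_cluster_chunks_py : Prop := ∀ (chunks : List (List (String × String))), Dom_cluster_chunks_py chunks → Spec_cluster_chunks_py chunks (cluster_chunks_py chunks)

-- ===== LEMMAS AND PROOFS =====

-- A's per-cluster condition, stated on the whole cluster lists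
def pvOv (K ks : PySem.Set String) : Int := PySem.Set.len (PySem.Set.inter K ks)

def pvPred (K : PySem.Set String) (src : String) (ksets srcs : List (PySem.Set String)) (c : Nat) : Prop :=
  2 ≤ pvOv K (ksets.getD c []) ∨ (src ∈ srcs.getD c [] ∧ 1 ≤ pvOv K (ksets.getD c []))

-- the coupling invariant between A's cluster lists and B's inverted indexes
def pvInv (ksets srcs : List (PySem.Set String))
    (kwidx srcidx : PySem.Dict String (PySem.Set Nat)) (n : Nat) : Prop :=
  n = ksets.length ∧ srcs.length = ksets.length ∧
  (∀ kw : String, (kwidx.getD kw PySem.Set.empty).Nodup) ∧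
  (∀ (kw : String) (c : Nat), c ∈ kwidx.getD kw PySem.Set.empty ↔
      ∃ h : c < ksets.length, kw ∈ ksets[c]) ∧
  (∀ (s : String) (c : Nat), c ∈ srcidx.getD s PySem.Set.empty ↔
      ∃ h : c < srcs.length, s ∈ srcs[c])

lemma pvAFind_shift (K : PySem.Set String) (src : String) :
    ∀ (ksets srcs : List (PySem.Set String)) (i : Nat),
      pvAFind K src ksets srcs i = (pvAFind K src ksets srcs 0).map (· + i) := by
  intro ksets
  induction ksets with
  | nil => intro srcs i; simp [pvAFind]
  | cons ks krest ih =>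
    intro srcs i
    cases srcs with
    | nil => simp [pvAFind]
    | cons ss srest =>
      simp only [pvAFind]
      split
      · simp
      · rw [ih srest (i + 1), ih srest 1, Option.map_map]
        congr 1
        funext x
        simp
        omega

lemma pvAFind_some_iff (K : PySem.Set String) (src : String)
    (ksets srcs : List (PySem.Set String)) (h : srcs.length = ksets.length) (c : Nat) :
    pvAFind K src ksets srcs 0 = some c ↔
      (c < ksets.length ∧ pvPred K src ksets srcs c ∧ ∀ j, j < c → ¬ pvPred K src ksets srcs j) := by
  induction ksets generalizing srcs c with
  | nil => simp [pvAFind]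
  | cons ks krest ih =>
    cases srcs with
    | nil => simp at h
    | cons ss srest =>
      have h' : srest.length = krest.length := by simpa using h
      have hp0 : pvPred K src (ks :: krest) (ss :: srest) 0 ↔
          (2 ≤ PySem.Set.len (PySem.Set.inter K ks) ∨
            (PySem.Set.contains ss src = true ∧ 1 ≤ PySem.Set.len (PySem.Set.inter K ks))) := by
        simp [pvPred, pvOv]
      have hpS : ∀ j, pvPred K src (ks :: krest) (ss :: srest) (j + 1) ↔
          pvPred K src krest srest j := by
        intro j; simp [pvPred]
      by_cases hcond : (2 ≤ PySem.Set.len (PySem.Set.inter K ks) ∨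
          (PySem.Set.contains ss src = true ∧ 1 ≤ PySem.Set.len (PySem.Set.inter K ks)))
      · simp only [pvAFind, if_pos hcond]
        constructor
        · intro h0
          obtain rfl : c = 0 := by simpa using h0.symm
          exact ⟨by simp, hp0.mpr hcond, by omega⟩
        · rintro ⟨hlt, hpred, hleast⟩
          obtain rfl : c = 0 := by
            by_contra hne
            exact hleast 0 (by omega) (hp0.mpr hcond)
          rfl
      · simp only [pvAFind, if_neg hcond]
        rw [pvAFind_shift]
        constructor
        · intro hmap
          obtain ⟨c', hc', rfl⟩ : ∃ c', pvAFind K src krest srest 0 = some c' ∧ c' + 1 = c := by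
            simpa using hmap
          obtain ⟨hlt, hpred, hleast⟩ := (ih srest h' c').mp hc'
          refine ⟨by simpa using Nat.succ_lt_succ hlt, (hpS c').mpr hpred, ?_⟩
          intro j hj
          cases j with
          | zero => rw [hp0]; exact hcond
          | succ j' => rw [hpS j']; exact hleast j' (by omega)
        · rintro ⟨hlt, hpred, hleast⟩
          cases c with
          | zero => exact absurd (hp0.mp hpred) hcond
          | succ c' =>
            have : pvAFind K src krest srest 0 = some c' := by
              refine (ih srest h' c').mpr ⟨by simpa using hlt, (hpS c').mp hpred, ?_⟩
              intro j hj hpj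
              exact hleast (j + 1) (by omega) ((hpS j).mpr hpj)
            simp [this]

lemma pvAFind_none_iff (K : PySem.Set String) (src : String)
    (ksets srcs : List (PySem.Set String)) (h : srcs.length = ksets.length) :
    pvAFind K src ksets srcs 0 = none ↔ ∀ c, c < ksets.length → ¬ pvPred K src ksets srcs c := by
  classical
  constructor
  · intro hnone c hc hp
    have hex : ∃ j, j < ksets.length ∧ pvPred K src ksets srcs j := ⟨c, hc, hp⟩
    obtain ⟨hj, hpj⟩ := Nat.find_spec hex
    have : pvAFind K src ksets srcs 0 = some (Nat.find hex) := by
      refine (pvAFind_some_iff K src ksets srcs h _).mpr ⟨hj, hpj, fun j hjlt hpj' =>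
        Nat.find_min hex hjlt ⟨by omega, hpj'⟩⟩
    rw [hnone] at this
    simp at this
  · intro hall
    cases heq : pvAFind K src ksets srcs 0 with
    | none => rfl
    | some c =>
      obtain ⟨hlt, hpred, _⟩ := (pvAFind_some_iff K src ksets srcs h c).mp heq
      exact absurd hpred (hall c hlt)

lemma pvBCounts_getD (K : PySem.Set String) (kwidx : PySem.Dict String (PySem.Set Nat))
    (hnd : ∀ kw, (kwidx.getD kw PySem.Set.empty).Nodup) (c : Nat) :
    (pvBCounts K kwidx).getD c 0 =
      ((K.filter (fun kw => decide (c ∈ kwidx.getD kw PySem.Set.empty))).length : Int) := by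
  suffices h : ∀ (L : List String) (cnt : PySem.Dict Nat Int),
      (L.foldl (fun cnt kw =>
          (kwidx.getD kw PySem.Set.empty).foldl (fun cnt c => cnt.modify c 0 (· + 1)) cnt) cnt).getD c 0
        = cnt.getD c 0 + ((L.filter (fun kw => decide (c ∈ kwidx.getD kw PySem.Set.empty))).length : Int) by
    simpa [pvBCounts] using h K PySem.Dict.empty
  intro L
  induction L with
  | nil => simp
  | cons kw L' ih =>
    intro cnt
    simp only [List.foldl_cons]
    rw [ih, PySem.Dict.getD_foldl_modify_add_one]
    by_cases hm : c ∈ kwidx.getD kw PySem.Set.empty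
    · rw [List.count_eq_one_of_mem (hnd kw) hm]
      simp only [List.filter_cons, hm, decide_true, if_pos, List.length_cons]
      push_cast
      ring
    · rw [List.count_eq_zero.mpr hm]
      simp only [List.filter_cons, hm, decide_false, Bool.false_eq_true, if_false]
      push_cast
      ring

lemma pvBCounts_keys_nodup (K : PySem.Set String) (kwidx : PySem.Dict String (PySem.Set Nat)) :
    (pvBCounts K kwidx).keys.Nodup := by
  suffices h : ∀ (L : List String) (cnt : PySem.Dict Nat Int), cnt.keys.Nodup →
      (L.foldl (fun cnt kw =>
          (kwidx.getD kw PySem.Set.empty).foldl (fun cnt c => cnt.modify c 0 (· + 1)) cnt) cnt).keys.Nodup by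
    exact h K PySem.Dict.empty (by simp [PySem.Dict.keys_empty])
  intro L
  induction L with
  | nil => intro cnt h; exact h
  | cons kw L' ih =>
    intro cnt h
    simp only [List.foldl_cons]
    apply ih
    rw [PySem.Dict.keys_foldl_modify (f := fun _ _ => (· + 1))]
    exact PySem.Set.nodup_update _ _ h

lemma pvBCounts_mem_keys (K : PySem.Set String) (kwidx : PySem.Dict String (PySem.Set Nat)) (c : Nat) :
    c ∈ (pvBCounts K kwidx).keys ↔ ∃ kw ∈ K, c ∈ kwidx.getD kw PySem.Set.empty := by
  suffices h : ∀ (L : List String) (cnt : PySem.Dict Nat Int),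
      c ∈ (L.foldl (fun cnt kw =>
          (kwidx.getD kw PySem.Set.empty).foldl (fun cnt c => cnt.modify c 0 (· + 1)) cnt) cnt).keys ↔
        c ∈ cnt.keys ∨ ∃ kw ∈ L, c ∈ kwidx.getD kw PySem.Set.empty by
    simpa [pvBCounts, PySem.Dict.keys_empty] using h K PySem.Dict.empty
  intro L
  induction L with
  | nil => simp
  | cons kw L' ih =>
    intro cnt
    simp only [List.foldl_cons]
    rw [ih, PySem.Dict.keys_foldl_modify (f := fun _ _ => (· + 1)), PySem.Set.mem_update]
    constructor
    · rintro ((h | h) | h)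
      · tauto
      · exact Or.inr ⟨kw, by simp, h⟩
      · rcases h with ⟨kw', hkw', hc⟩; exact Or.inr ⟨kw', by simp [hkw'], hc⟩
    · rintro (h | ⟨kw', hkw', hc⟩)
      · tauto
      · rcases List.mem_cons.mp hkw' with rfl | hkw'
        · tauto
        · exact Or.inr ⟨kw', hkw', hc⟩

lemma pvBIndexAdd_mem (K : PySem.Set String) (kwidx : PySem.Dict String (PySem.Set Nat)) (a : Nat)
    (kw : String) (c : Nat) :
    c ∈ (pvBIndexAdd K kwidx a).getD kw PySem.Set.empty ↔
      c ∈ kwidx.getD kw PySem.Set.empty ∨ (kw ∈ K ∧ c = a) := by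
  induction K generalizing kwidx with
  | nil => simp [pvBIndexAdd]
  | cons kw' K' ih =>
    simp only [pvBIndexAdd, List.foldl_cons] at *
    rw [ih]
    by_cases hk : kw = kw'
    · subst hk
      rw [PySem.Dict.getD_modify, if_pos rfl, PySem.Set.mem_add]
      constructor
      · rintro ((h | h) | h) <;> tauto
      · rintro (h | ⟨hm, rfl⟩)
        · tauto
        · rcases List.mem_cons.mp hm with hm | hm
          · tauto
          · tauto
    · rw [PySem.Dict.getD_modify, if_neg hk]
      constructor
      · rintro (h | h) <;> tauto
      · rintro (h | ⟨hm, rfl⟩)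
        · tauto
        · rcases List.mem_cons.mp hm with hm | hm
          · exact absurd hm hk
          · tauto

lemma pvBIndexAdd_nodup (K : PySem.Set String) (kwidx : PySem.Dict String (PySem.Set Nat)) (a : Nat)
    (hnd : ∀ kw, (kwidx.getD kw PySem.Set.empty).Nodup) :
    ∀ kw, ((pvBIndexAdd K kwidx a).getD kw PySem.Set.empty).Nodup := by
  induction K generalizing kwidx with
  | nil => simpa [pvBIndexAdd] using hnd
  | cons kw' K' ih =>
    simp only [pvBIndexAdd, List.foldl_cons] at *
    apply ih
    intro kw
    rw [PySem.Dict.getD_modify]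
    split
    · exact PySem.Set.nodup_add _ _ (hnd kw')
    · exact hnd kw

lemma pvModify_mem (srcidx : PySem.Dict String (PySem.Set Nat)) (src : String) (a : Nat)
    (s : String) (c : Nat) :
    c ∈ (srcidx.modify src PySem.Set.empty (fun t => PySem.Set.add t a)).getD s PySem.Set.empty ↔
      c ∈ srcidx.getD s PySem.Set.empty ∨ (s = src ∧ c = a) := by
  rw [PySem.Dict.getD_modify]
  by_cases hs : s = src
  · subst hs; rw [if_pos rfl, PySem.Set.mem_add]; tauto
  · rw [if_neg hs]; tauto

-- the candidate list of B holds exactly the valid cluster indexes satisfying A's condition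
lemma pvCands_mem (K : PySem.Set String) (src : String) (ksets srcs : List (PySem.Set String))
    (kwidx srcidx : PySem.Dict String (PySem.Set Nat)) (n : Nat)
    (hinv : pvInv ksets srcs kwidx srcidx n) (c : Nat) :
    c ∈ ((pvBCounts K kwidx).items.filter
        (fun p => decide (2 ≤ p.2) || PySem.Set.contains (srcidx.getD src PySem.Set.empty) p.1)).map (·.1) ↔
      c < ksets.length ∧ pvPred K src ksets srcs c := by
  obtain ⟨hn, hlen, hnd, hkwI, hsrcI⟩ := hinv
  have hkeysnd := pvBCounts_keys_nodup K kwidx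
  have h1 : c ∈ ((pvBCounts K kwidx).items.filter
        (fun p => decide (2 ≤ p.2) || PySem.Set.contains (srcidx.getD src PySem.Set.empty) p.1)).map (·.1) ↔
      ∃ v, (c, v) ∈ (pvBCounts K kwidx).items ∧
        (decide (2 ≤ v) || PySem.Set.contains (srcidx.getD src PySem.Set.empty) c) = true := by
    simp only [List.mem_map, List.mem_filter]
    constructor
    · rintro ⟨⟨c', v⟩, ⟨hm, hq⟩, rfl⟩; exact ⟨v, hm, hq⟩
    · rintro ⟨v, hm, hq⟩; exact ⟨(c, v), ⟨hm, hq⟩, rfl⟩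
  have hmain : c ∈ ((pvBCounts K kwidx).items.filter
        (fun p => decide (2 ≤ p.2) || PySem.Set.contains (srcidx.getD src PySem.Set.empty) p.1)).map (·.1) ↔
      (c ∈ (pvBCounts K kwidx).keys ∧
        (2 ≤ (pvBCounts K kwidx).getD c 0 ∨
          PySem.Set.contains (srcidx.getD src PySem.Set.empty) c = true)) := by
    rw [h1]
    cases hget : (pvBCounts K kwidx).get? c with
    | none =>
      have hnk : c ∉ (pvBCounts K kwidx).keys :=
        (PySem.Dict.get?_eq_none_iff_not_mem_keys _ c).mp hget
      constructor
      · rintro ⟨v, hm, _⟩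
        exact absurd ((PySem.Dict.get?_eq_some_iff_mem_items _ c v hkeysnd).mpr hm) (by simp [hget])
      · rintro ⟨hk, _⟩; exact absurd hk hnk
    | some v0 =>
      have hk : c ∈ (pvBCounts K kwidx).keys := by
        rw [← PySem.Dict.contains_iff_mem_keys, PySem.Dict.contains_eq_isSome_get?, hget]; rfl
      have hgd : (pvBCounts K kwidx).getD c 0 = v0 := by
        rw [PySem.Dict.getD_eq_get?_getD, hget]; rfl
      constructor
      · rintro ⟨v, hm, hq⟩
        have : some v0 = some v := hget ▸ ((PySem.Dict.get?_eq_some_iff_mem_items _ c v hkeysnd).mpr hm)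
        obtain rfl : v0 = v := by simpa using this
        refine ⟨hk, ?_⟩
        simp only [Bool.or_eq_true, decide_eq_true_eq] at hq
        rcases hq with h | h
        · exact Or.inl (by rw [hgd]; exact h)
        · exact Or.inr h
      · rintro ⟨_, hq⟩
        refine ⟨v0, (PySem.Dict.get?_eq_some_iff_mem_items _ c v0 hkeysnd).mp hget, ?_⟩
        rcases hq with h | h
        · rw [hgd] at h
          rw [decide_eq_true h, Bool.true_or]
        · rw [h, Bool.or_true]
  rw [hmain, pvBCounts_mem_keys, pvBCounts_getD K kwidx hnd c]
  by_cases hc : c < ksets.length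
  · have hmemiff : ∀ kw, c ∈ kwidx.getD kw PySem.Set.empty ↔ kw ∈ ksets[c] := by
      intro kw
      rw [hkwI kw c]
      exact ⟨fun ⟨_, h⟩ => h, fun h => ⟨hc, h⟩⟩
    have hfil : K.filter (fun kw => decide (c ∈ kwidx.getD kw PySem.Set.empty)) =
        K.filter (fun kw => (ksets[c]'hc).contains kw) := by
      apply List.filter_congr
      intro kw _
      simp only [PySem.Set.contains_eq_listContains, List.contains_eq_mem]
      exact decide_eq_decide.mpr (hmemiff kw)
    have hov : pvOv K (ksets.getD c []) =
        ((K.filter (fun kw => (ksets[c]'hc).contains kw)).length : Int) := by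
      rw [List.getD_eq_getElem _ _ hc]
      rfl
    have hsrcC : PySem.Set.contains (srcidx.getD src PySem.Set.empty) c = true ↔
        src ∈ srcs.getD c [] := by
      rw [PySem.Set.contains_iff, hsrcI src c, List.getD_eq_getElem _ _ (by omega : c < srcs.length)]
      exact ⟨fun ⟨_, h⟩ => h, fun h => ⟨by omega, h⟩⟩
    have hex : (∃ kw ∈ K, c ∈ kwidx.getD kw PySem.Set.empty) ↔
        0 < (K.filter (fun kw => (ksets[c]'hc).contains kw)).length := by
      rw [List.length_filter_pos_iff]
      simp only [PySem.Set.contains_eq_listContains, List.contains_eq_mem, decide_eq_true_eq]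
      constructor
      · rintro ⟨kw, hkwm, hmem⟩
        exact ⟨kw, hkwm, (hmemiff kw).mp hmem⟩
      · rintro ⟨kw, hkwm, hcont⟩
        exact ⟨kw, hkwm, (hmemiff kw).mpr hcont⟩
    rw [hfil, hex, hsrcC]
    unfold pvPred
    rw [hov]
    constructor
    · rintro ⟨hpos, h2 | hsrcm⟩
      · exact ⟨hc, Or.inl (by exact_mod_cast h2)⟩
      · exact ⟨hc, Or.inr ⟨hsrcm, by exact_mod_cast hpos⟩⟩
    · rintro ⟨_, h2 | ⟨hsrcm, h1'⟩⟩
      · have h2' : 2 ≤ (K.filter (fun kw => (ksets[c]'hc).contains kw)).length := by exact_mod_cast h2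
        exact ⟨by omega, Or.inl h2⟩
      · have h1'' : 1 ≤ (K.filter (fun kw => (ksets[c]'hc).contains kw)).length := by exact_mod_cast h1'
        exact ⟨by omega, Or.inr hsrcm⟩
  · constructor
    · rintro ⟨⟨kw, _, hmem⟩, _⟩
      obtain ⟨h, _⟩ := (hkwI kw c).mp hmem
      exact absurd h hc
    · rintro ⟨h, _⟩; exact absurd h hc

lemma pvChoice_eq (K : PySem.Set String) (src : String) (ksets srcs : List (PySem.Set String))
    (kwidx srcidx : PySem.Dict String (PySem.Set Nat)) (n : Nat)
    (hinv : pvInv ksets srcs kwidx srcidx n) :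
    pvAFind K src ksets srcs 0 =
      PySem.List.min? (((pvBCounts K kwidx).items.filter
        (fun p => decide (2 ≤ p.2) || PySem.Set.contains (srcidx.getD src PySem.Set.empty) p.1)).map (·.1))
        (fun c => c) := by
  have hlen : srcs.length = ksets.length := hinv.2.1
  cases heq : pvAFind K src ksets srcs 0 with
  | some c =>
    obtain ⟨hlt, hpred, hleast⟩ := (pvAFind_some_iff K src ksets srcs hlen c).mp heq
    have hcmem := (pvCands_mem K src ksets srcs kwidx srcidx n hinv c).mpr ⟨hlt, hpred⟩
    cases hmin : PySem.List.min? (((pvBCounts K kwidx).items.filter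
        (fun p => decide (2 ≤ p.2) || PySem.Set.contains (srcidx.getD src PySem.Set.empty) p.1)).map (·.1)) (fun c => c) with
    | none =>
      rw [PySem.List.min?_eq_none_iff] at hmin
      rw [hmin] at hcmem
      exact absurd hcmem (List.not_mem_nil)
    | some m =>
      have hm := PySem.List.min?_mem hmin
      obtain ⟨hmlt, hmpred⟩ := (pvCands_mem K src ksets srcs kwidx srcidx n hinv m).mp hm
      have h1 : m ≤ c := PySem.List.min?_isMin hmin c hcmem
      have h2 : ¬ m < c := fun hlt' => hleast m hlt' hmpred
      congr 1
      omega
  | none =>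
    have hall := (pvAFind_none_iff K src ksets srcs hlen).mp heq
    have hnil : ((pvBCounts K kwidx).items.filter
        (fun p => decide (2 ≤ p.2) || PySem.Set.contains (srcidx.getD src PySem.Set.empty) p.1)).map (·.1) = [] := by
      rw [List.eq_nil_iff_forall_not_mem]
      intro m hm
      obtain ⟨hmlt, hmpred⟩ := (pvCands_mem K src ksets srcs kwidx srcidx n hinv m).mp hm
      exact hall m hmlt hmpred
    rw [hnil]
    rfl

lemma pvLoop_eq (chunks : List (List (String × String))) :
    ∀ (ksets srcs : List (PySem.Set String)) (kwidx srcidx : PySem.Dict String (PySem.Set Nat))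
      (n : Nat) (idx : Int) (acc : List (Int × String)),
      pvInv ksets srcs kwidx srcidx n →
      pvALoop chunks ksets srcs idx acc = pvBLoop chunks kwidx srcidx n idx acc := by
  induction chunks with
  | nil => intros; rfl
  | cons ch rest ih =>
    intro ksets srcs kwidx srcidx n idx acc hinv
    obtain ⟨hn, hlen, hnd, hkwI, hsrcI⟩ := hinv
    simp only [pvALoop, pvBLoop]
    rw [← pvChoice_eq (pvChunkKeywords ch) (pvChunkSource ch) ksets srcs kwidx srcidx n
          ⟨hn, hlen, hnd, hkwI, hsrcI⟩]
    cases heq : pvAFind (pvChunkKeywords ch) (pvChunkSource ch) ksets srcs 0 with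
    | some c =>
      obtain ⟨hlt, hpred, _⟩ := (pvAFind_some_iff _ _ _ _ hlen c).mp heq
      apply ih
      refine ⟨by rw [List.length_modify]; exact hn, by simp [List.length_modify, hlen], pvBIndexAdd_nodup _ _ _ hnd, ?_, ?_⟩
      · intro kw y
        rw [pvBIndexAdd_mem, hkwI kw y]
        constructor
        · rintro (⟨hy, hm⟩ | ⟨hmK, rfl⟩)
          · refine ⟨by simpa [List.length_modify] using hy, ?_⟩
            rw [List.getElem_modify]
            split
            · next hcy =>
                subst hcy
                rw [PySem.Set.mem_update]
                exact Or.inl hm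
            · exact hm
          · refine ⟨by simpa [List.length_modify] using hlt, ?_⟩
            rw [List.getElem_modify, if_pos rfl, PySem.Set.mem_update]
            exact Or.inr hmK
        · rintro ⟨hy, hm⟩
          have hy' : y < ksets.length := by simpa [List.length_modify] using hy
          rw [List.getElem_modify] at hm
          by_cases hcy : c = y
          · subst hcy
            rw [if_pos rfl, PySem.Set.mem_update] at hm
            rcases hm with hm | hm
            · exact Or.inl ⟨hy', hm⟩
            · exact Or.inr ⟨hm, rfl⟩
          · rw [if_neg hcy] at hm
            exact Or.inl ⟨hy', hm⟩
      · intro t y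
        rw [pvModify_mem, hsrcI t y]
        constructor
        · rintro (⟨hy, hm⟩ | ⟨rfl, rfl⟩)
          · refine ⟨by simpa [List.length_modify] using hy, ?_⟩
            rw [List.getElem_modify]
            split
            · next hcy =>
                subst hcy
                rw [PySem.Set.mem_add]
                exact Or.inl hm
            · exact hm
          · refine ⟨by simp [List.length_modify]; omega, ?_⟩
            rw [List.getElem_modify, if_pos rfl, PySem.Set.mem_add]
            exact Or.inr rfl
        · rintro ⟨hy, hm⟩
          have hy' : y < srcs.length := by simpa [List.length_modify] using hy
          rw [List.getElem_modify] at hm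
          by_cases hcy : c = y
          · subst hcy
            rw [if_pos rfl, PySem.Set.mem_add] at hm
            rcases hm with hm | hm
            · exact Or.inl ⟨hy', hm⟩
            · exact Or.inr ⟨hm, rfl⟩
          · rw [if_neg hcy] at hm
            exact Or.inl ⟨hy', hm⟩
    | none =>
      rw [hn]
      apply ih
      refine ⟨by simp, by simp [hlen], pvBIndexAdd_nodup _ _ _ hnd, ?_, ?_⟩
      · intro kw y
        rw [pvBIndexAdd_mem, hkwI kw y]
        constructor
        · rintro (⟨hy, hm⟩ | ⟨hmK, rfl⟩)
          · exact ⟨by simp; omega, by rw [List.getElem_append_left hy]; exact hm⟩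
          · exact ⟨by simp, by rw [List.getElem_concat_length] <;> first | exact hmK | rfl⟩
        · rintro ⟨hy, hm⟩
          have hy2 : y < ksets.length + 1 := by simpa using hy
          rcases Nat.lt_succ_iff_lt_or_eq.mp hy2 with hy' | rfl
          · rw [List.getElem_append_left hy'] at hm
            exact Or.inl ⟨hy', hm⟩
          · rw [List.getElem_concat_length] at hm
            · exact Or.inr ⟨hm, rfl⟩
            · rfl
      · intro t y
        rw [pvModify_mem, hsrcI t y]
        constructor
        · rintro (⟨hy, hm⟩ | ⟨rfl, rfl⟩)
          · exact ⟨by simp; omega, by rw [List.getElem_append_left hy]; exact hm⟩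
          · refine ⟨by simp [hlen], ?_⟩
            rw [List.getElem_append_right (by omega)]
            have hof : PySem.Set.ofList [pvChunkSource ch] = [pvChunkSource ch] :=
              PySem.Set.ofList_eq_self_of_nodup _ (by simp)
            simp [hof]
        · rintro ⟨hy, hm⟩
          have hy2 : y < srcs.length + 1 := by simpa using hy
          rcases Nat.lt_succ_iff_lt_or_eq.mp hy2 with hy' | rfl
          · rw [List.getElem_append_left hy'] at hm
            exact Or.inl ⟨hy', hm⟩
          · rw [List.getElem_concat_length] at hm
            · have hof : PySem.Set.ofList [pvChunkSource ch] = [pvChunkSource ch] :=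
                PySem.Set.ofList_eq_self_of_nodup _ (by simp)
              rw [hof] at hm
              exact Or.inr ⟨List.mem_singleton.mp hm, hlen⟩
            · rfl

-- ===== VERDICT (by name: the statement is the Claim_ definition above) =====
theorem cluster_chunks_py_spec : Claim_equal_cluster_chunks_py := by
  intro chunks _
  unfold Spec_cluster_chunks_py cluster_chunks_py cluster_chunks_py_alt
  exact pvLoop_eq chunks [] [] PySem.Dict.empty PySem.Dict.empty 0 0 []
    ⟨rfl, rfl, fun kw => by simp [PySem.Dict.getD_empty],
      fun kw c => by simp [PySem.Dict.getD_empty],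
      fun t c => by simp [PySem.Dict.getD_empty]⟩
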